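-- pv_equiv track=rewrite | github.com/nikhilbommu/DS-PS-Algorithms | Leetcode/LeetCode Problems/BuddyStrings.py | buddyStrings
-- ===== SOURCE A (Python) =====
-- def buddyStrings(A: str, B: str) -> bool:
--     if len(A) != len(B):
--         return False
--     elif A == B and len(A) == len(set(A)):
--         return False
--     elif A == B[::-1]:
--         return True
--     else:
--         i = 0
--         A, B = list(A), list(B)
--         while i < len(A):
--             if A[i] == B[i]:
--                 del A[i]
--                 del B[i]
--                 i -= 1
--                 if len(A) == 0:
--                     return True
--             i += 1
--         if A == B[::-1]:
--             return True
--         return False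
-- ===== SOURCE B (Python) =====
-- def buddyStrings(A: str, B: str) -> bool:
--     if len(A) != len(B):
--         return False
--     if A == B:
--         return len(set(A)) != len(A)
--     pairs = [(a, b) for a, b in zip(A, B) if a != b]
--     return A == B[::-1] or [a for a, _ in pairs] == [b for _, b in pairs][::-1]
-- ===== Notes on version B (the rewrite author's own statement) =====
-- stated objective: faster
-- what changed: Replaced the O(n^2) in-place deletion loop (repeated list del) with one linear zip pass collecting the mismatched character pairs and comparing the A-side mismatches with the reversed B-side mismatches; the equal-strings case reduces to a duplicate check.
import Mathlib
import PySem

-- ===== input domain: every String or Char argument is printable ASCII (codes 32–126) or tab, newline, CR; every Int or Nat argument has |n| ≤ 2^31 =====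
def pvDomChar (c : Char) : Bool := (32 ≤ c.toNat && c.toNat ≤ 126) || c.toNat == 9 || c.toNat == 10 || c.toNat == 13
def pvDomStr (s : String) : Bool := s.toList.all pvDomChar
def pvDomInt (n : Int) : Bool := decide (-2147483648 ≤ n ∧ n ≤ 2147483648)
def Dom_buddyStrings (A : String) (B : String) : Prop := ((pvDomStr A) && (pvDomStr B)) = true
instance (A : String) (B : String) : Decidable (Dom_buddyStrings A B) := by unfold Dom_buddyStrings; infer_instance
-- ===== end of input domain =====

-- B replaces A's quadratic delete-in-place scan by one linear zip pass over the mismatched pairs (objective: faster).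

-- ===== PORT A =====
-- A's while loop: matched pairs are deleted in place ('del A[i]; del B[i]'); 'i -= 1'
-- immediately followed by 'i += 1' cancels, so the recursive call keeps i, with the
-- 'len(A) == 0' early return taken between those two steps.  B[::-1] is List.reverse (exact).
def buddyLoop (A : List Char) (B : List Char) (i : Nat) : Bool :=
  if h : i < A.length then
    if A[i]? == B[i]? then
      let A' := A.eraseIdx i
      let B' := B.eraseIdx i
      if A'.length = 0 then true
      else buddyLoop A' B' i
    else buddyLoop A B (i + 1)
  else
    A == B.reverse
termination_by A.length - i
decreasing_by
  · have h1 : (A.eraseIdx i).length = A.length - 1 := by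
      rw [List.length_eraseIdx]; simp [h]
    simp only [A'] at *
    omega
  · omega

-- string comparisons are done on .toList (String equality is List Char equality)
def buddyA (la : List Char) (lb : List Char) : Bool :=
  if la.length ≠ lb.length then false
  else if la == lb && la.length == (PySem.Set.ofList la).length then false
  else if la == lb.reverse then true
  else buddyLoop la lb 0

def buddyStrings (A : String) (B : String) : Bool :=
  buddyA A.toList B.toList

-- ===== PORT B =====
def buddyAlt (la : List Char) (lb : List Char) : Bool :=
  if la.length ≠ lb.length then false
  else if la == lb then decide ((PySem.Set.ofList la).length ≠ la.length)
  else
    let pairs := (la.zip lb).filter (fun p => !(p.1 == p.2))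
    la == lb.reverse || (pairs.map Prod.fst == (pairs.map Prod.snd).reverse)

def buddyStrings_alt (A : String) (B : String) : Bool :=
  buddyAlt A.toList B.toList

-- ===== PRECONDITION & SPEC =====
def Spec_buddyStrings (A : String) (B : String) (out : Bool) : Prop := out = buddyStrings_alt A B
instance (A : String) (B : String) (out : Bool) : Decidable (Spec_buddyStrings A B out) := by unfold Spec_buddyStrings; infer_instance

-- ===== CLAIM (what is proved, stated in full; the proofs are below) =====
def Claim_equal_buddyStrings : Prop := ∀ (A : String) (B : String), Dom_buddyStrings A B → Spec_buddyStrings A B (buddyStrings A B)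

-- ===== LEMMAS AND PROOFS =====

-- A's deletion loop, entered at index i with the first i positions already scanned (all kept,
-- i.e. mismatched), returns exactly the comparison "remaining A-side == reverse of remaining
-- B-side", where the remainders keep the prefix and the mismatched pairs of the suffix.
lemma buddyLoop_eq (n : Nat) (A B : List Char) (h : A.length = B.length)
    (i : Nat) (hn : A.length - i ≤ n) :
    buddyLoop A B i =
      ((A.take i ++ (((A.drop i).zip (B.drop i)).filter (fun p => !(p.1 == p.2))).map Prod.fst)
        == (B.take i ++ (((A.drop i).zip (B.drop i)).filter (fun p => !(p.1 == p.2))).map Prod.snd).reverse) := by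
  induction n generalizing A B i with
  | zero =>
      have hi : A.length ≤ i := by omega
      rw [buddyLoop]
      simp [Nat.not_lt.mpr hi, List.drop_eq_nil_of_le hi, List.drop_eq_nil_of_le (h ▸ hi),
        List.take_of_length_le hi, List.take_of_length_le (h ▸ hi)]
  | succ n ih =>
      by_cases hi : i < A.length
      · have hiB : i < B.length := h ▸ hi
        rw [buddyLoop]
        simp only [hi, dif_pos]
        have hdA : A.drop i = A[i] :: A.drop (i + 1) := List.drop_eq_getElem_cons hi
        have hdB : B.drop i = B[i] :: B.drop (i + 1) := List.drop_eq_getElem_cons hiB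
        have htakeLen : (A.take i).length = i := by simp; omega
        have htakeLenB : (B.take i).length = i := by simp; omega
        by_cases heq : A[i] = B[i]
        · have hopt : (A[i]? == B[i]?) = true := by
            simp [List.getElem?_eq_getElem hi, List.getElem?_eq_getElem hiB, heq]
          simp only [hopt, if_pos]
          have hbe : (A[i] == B[i]) = true := by simp [heq]
          have hfilt : ((A.drop i).zip (B.drop i)).filter (fun p => !(p.1 == p.2))
              = ((A.drop (i + 1)).zip (B.drop (i + 1))).filter (fun p => !(p.1 == p.2)) := by
            rw [hdA, hdB, List.zip_cons_cons, List.filter_cons]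
            simp [hbe]
          have hAE : A.eraseIdx i = A.take i ++ A.drop (i + 1) := List.eraseIdx_eq_take_drop_succ A i
          have hBE : B.eraseIdx i = B.take i ++ B.drop (i + 1) := List.eraseIdx_eq_take_drop_succ B i
          have hlenA : (A.eraseIdx i).length = A.length - 1 := by
            rw [List.length_eraseIdx]; simp [hi]
          have hlenB : (B.eraseIdx i).length = B.length - 1 := by
            rw [List.length_eraseIdx]; simp [hiB]
          have htA : (A.eraseIdx i).take i = A.take i := by
            rw [hAE]; exact List.take_left' htakeLen
          have htB : (B.eraseIdx i).take i = B.take i := by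
            rw [hBE]; exact List.take_left' htakeLenB
          have hdA' : (A.eraseIdx i).drop i = A.drop (i + 1) := by
            rw [hAE]; exact List.drop_left' htakeLen
          have hdB' : (B.eraseIdx i).drop i = B.drop (i + 1) := by
            rw [hBE]; exact List.drop_left' htakeLenB
          by_cases hz : (A.eraseIdx i).length = 0
          · -- everything deleted: A had length 1, i = 0, the single pair matched
            have hA1 : A.length = 1 := by omega
            have hi0 : i = 0 := by omega
            subst hi0
            have hAnil : A.drop 1 = [] := List.drop_eq_nil_of_le (by omega)
            have hBnil : B.drop 1 = [] := List.drop_eq_nil_of_le (by omega)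
            simp only [hz, if_pos]
            rw [hfilt, hAnil, hBnil]
            simp
          · simp only [hz, ite_false]
            rw [ih (A.eraseIdx i) (B.eraseIdx i) (by omega) i (by omega),
              htA, htB, hdA', hdB', ← hfilt]
        · have hopt : (A[i]? == B[i]?) = false := by
            simp [List.getElem?_eq_getElem hi, List.getElem?_eq_getElem hiB, heq]
          simp only [hopt, Bool.false_eq_true, if_false]
          rw [ih A B h (i + 1) (by omega)]
          have hbe : (A[i] == B[i]) = false := by simp [heq]
          have hta : A.take (i + 1) = A.take i ++ [A[i]] := by
            rw [List.take_add_one, List.getElem?_eq_getElem hi]; rfl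
          have htb : B.take (i + 1) = B.take i ++ [B[i]] := by
            rw [List.take_add_one, List.getElem?_eq_getElem hiB]; rfl
          rw [hta, htb, hdA, hdB, List.zip_cons_cons,
            List.filter_cons_of_pos (by simp [hbe])]
          simp only [List.map_cons, List.append_assoc,
            List.reverse_append, List.cons_append, List.nil_append]
      · have hi' : A.length ≤ i := by omega
        rw [buddyLoop]
        simp [Nat.not_lt.mpr hi', List.drop_eq_nil_of_le hi', List.drop_eq_nil_of_le (h ▸ hi'),
          List.take_of_length_le hi', List.take_of_length_le (h ▸ hi')]

-- all pairs of (zip l l) are equal, so the mismatch filter is empty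
lemma filter_zip_self (l : List Char) :
    (l.zip l).filter (fun p => !(p.1 == p.2)) = [] := by
  induction l with
  | nil => rfl
  | cons a t ih => simp [ih]

lemma buddyA_eq_alt (la lb : List Char) : buddyA la lb = buddyAlt la lb := by
  unfold buddyA buddyAlt
  split_ifs with h1 h2 h3 h4 h5 h6
  · rfl
  · simp only [Bool.and_eq_true, beq_iff_eq] at h2
    simp [h2.2]
  · simp only [Bool.and_eq_true] at h2
    exact absurd h2.1 h3
  · simp at h2 h5 ⊢
    exact fun e => (h2 h5) e.symm
  · simp [h4]
  · simp at h2 h6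
    subst h6
    rw [buddyLoop_eq la.length la la rfl 0 (by omega)]
    simp [filter_zip_self]
    exact fun e => (h2 rfl) e.symm
  · rw [buddyLoop_eq la.length la lb (by omega) 0 (by omega)]
    have h4' : (la == lb.reverse) = false := by
      simpa using h4
    simp [h4']

-- ===== VERDICT (by name: the statement is the Claim_ definition above) =====
theorem buddyStrings_spec : Claim_equal_buddyStrings := by
  intro A B _
  unfold Spec_buddyStrings buddyStrings buddyStrings_alt
  exact buddyA_eq_alt A.toList B.toList
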